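-- pv_equiv track=rewrite | github.com/ashwinpm77/modified_feistel_cipher_using_python | Crypto.py | key_generator
-- ===== SOURCE A (Python) =====
-- key_constants = [
--     '10011110001101110111100110111001',
--     '01111000110111011110011011100110',
--     '11100011011101111001101110011001',
--     '10001101110111100110111001100111',
--     '00110111011110011011100110011110',
--     '11011101111001101110011001111000',
--     '01110111100110111001100111100011',
--     '11011110011011100110011110001101',
--     '00111100011011101111001101110011',
--     '11110001101110111100110111001100',
--     '11000110111011110011011100110011',
--     '00011011101111001101110011001111',
--     '01101110111100110111001100111100',
--     '10111011110011011100110011110001',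
--     '11101111001101110011001111000110',
--     '10111100110111001100111100011011'
-- ]
--
-- def xor(a, b):
--     output = ""
--     for _ in range(len(a)):
--         if a[_] == b[_]:
--             output += "0"
--         else:
--             output += "1"
--     return output
--
-- def key_generator(initial_key, no_of_keys):
--     keys = []
--     key = initial_key
--     l = len(key)
--     for _ in range(0, no_of_keys):
--         L = key[:int(l/2)]
--         R = key[int(l/2):]
--         L = (L+L[0])[1:]
--         R = (R+R[0])[1:]
--         key = R+L
--         keys.append(xor(xor(L, R), key_constants[_]))
--     return keys
-- ===== SOURCE B (Python) =====
-- key_constants = [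
--     '10011110001101110111100110111001',
--     '01111000110111011110011011100110',
--     '11100011011101111001101110011001',
--     '10001101110111100110111001100111',
--     '00110111011110011011100110011110',
--     '11011101111001101110011001111000',
--     '01110111100110111001100111100011',
--     '11011110011011100110011110001101',
--     '00111100011011101111001101110011',
--     '11110001101110111100110111001100',
--     '11000110111011110011011100110011',
--     '00011011101111001101110011001111',
--     '01101110111100110111001100111100',
--     '10111011110011011100110011110001',
--     '11101111001101110011001111000110',
--     '10111100110111001100111100011011'
-- ]
--
-- def key_generator(initial_key, no_of_keys):
--     # Track a permutation of character positions instead of rebuilding the key string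
--     # each round: one round moves the char at position pi[j] to position j.
--     s = initial_key
--     l = len(s)
--     m = l // 2
--     pi = [m + (j + 1) % (l - m) for j in range(l - m)] + [(j + 1) % m for j in range(m)]
--     p = list(range(l))
--     keys = []
--     for n in range(no_of_keys):
--         p = [p[j] for j in pi]
--         c = key_constants[n]
--         out = []
--         for i in range(m):
--             bit = '0' if s[p[(l - m) + i]] == s[p[i]] else '1'
--             out.append('0' if bit == c[i] else '1')
--         keys.append(''.join(out))
--     return keys
-- ===== Notes on version B (the rewrite author's own statement) =====
-- stated objective: alternative
-- what changed: Instead of rebuilding the key string each round (split, rotate both halves, swap, concatenate), B precomputes the fixed position permutation one round induces, composes it with a tracked index list per round, and reads each output bit directly from the original key through that permutation.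
import Mathlib
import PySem

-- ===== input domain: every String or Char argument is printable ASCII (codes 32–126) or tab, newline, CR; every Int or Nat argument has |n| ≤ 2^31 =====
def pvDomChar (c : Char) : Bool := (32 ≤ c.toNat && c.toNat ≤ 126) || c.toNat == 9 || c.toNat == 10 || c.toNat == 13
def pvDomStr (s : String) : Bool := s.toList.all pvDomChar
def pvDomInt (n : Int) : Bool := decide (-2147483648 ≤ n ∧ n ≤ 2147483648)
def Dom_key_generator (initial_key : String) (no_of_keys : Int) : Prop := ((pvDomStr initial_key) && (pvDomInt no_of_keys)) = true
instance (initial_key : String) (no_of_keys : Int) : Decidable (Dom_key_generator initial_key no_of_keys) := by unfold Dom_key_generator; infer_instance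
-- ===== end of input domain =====

-- B replaces the per-round split/rotate/swap string rebuilding with a precomputed position
-- permutation composed each round (alternative decomposition, same cost).


-- ===== PORT A =====
def pvKeyConstants : List (List Char) :=
  ["10011110001101110111100110111001".toList,
   "01111000110111011110011011100110".toList,
   "11100011011101111001101110011001".toList,
   "10001101110111100110111001100111".toList,
   "00110111011110011011100110011110".toList,
   "11011101111001101110011001111000".toList,
   "01110111100110111001100111100011".toList,
   "11011110011011100110011110001101".toList,
   "00111100011011101111001101110011".toList,
   "11110001101110111100110111001100".toList,
   "11000110111011110011011100110011".toList,
   "00011011101111001101110011001111".toList,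
   "01101110111100110111001100111100".toList,
   "10111011110011011100110011110001".toList,
   "11101111001101110011001111000110".toList,
   "10111100110111001100111100011011".toList]

-- Python's xor helper; indexing is total via getD (in range under Pre_).
def pvXorA (a b : List Char) : List Char :=
  (List.range a.length).foldl
    (fun out i => out ++ [if a.getD i ' ' = b.getD i ' ' then '0' else '1']) []

def key_generator (initial_key : String) (no_of_keys : Int) : List String :=
  let key0 := initial_key.toList
  let l := key0.length
  let res := (List.range no_of_keys.toNat).foldl
    (fun (st : List (List Char) × List Char) n =>
      let L := st.2.take (l / 2)
      let R := st.2.drop (l / 2)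
      let L := (L ++ [L.headD ' ']).drop 1
      let R := (R ++ [R.headD ' ']).drop 1
      let key := R ++ L
      (st.1 ++ [pvXorA (pvXorA L R) (pvKeyConstants.getD n [])], key))
    ([], key0)
  res.1.map String.mk

-- ===== PORT B =====
def key_generator_alt (initial_key : String) (no_of_keys : Int) : List String :=
  let s := initial_key.toList
  let l := s.length
  let m := l / 2
  let pi := (List.range (l - m)).map (fun j => m + (j + 1) % (l - m))
            ++ (List.range m).map (fun j => (j + 1) % m)
  let res := (List.range no_of_keys.toNat).foldl
    (fun (st : List (List Char) × List Nat) n =>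
      let p := pi.map (fun j => st.2.getD j 0)
      let c := pvKeyConstants.getD n []
      let out := (List.range m).foldl
        (fun out i =>
          let bit := if s.getD (p.getD ((l - m) + i) 0) ' ' = s.getD (p.getD i 0) ' '
                     then '0' else '1'
          out ++ [if bit = c.getD i ' ' then '0' else '1']) []
      (st.1 ++ [out], p))
    ([], List.range l)
  res.1.map String.mk

-- ===== PRECONDITION & SPEC =====
-- Exactly the inputs on which Python A returns: the loop body raises IndexError when a half
-- is empty (len < 2), when a round index reaches past the 16 key constants, or when the
-- half-length exceeds the 32-char constants (len > 65).
def Pre_key_generator (initial_key : String) (no_of_keys : Int) : Prop :=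
  no_of_keys ≤ 0 ∨
    (2 ≤ initial_key.toList.length ∧ no_of_keys ≤ 16 ∧ initial_key.toList.length ≤ 65)
instance (initial_key : String) (no_of_keys : Int) : Decidable (Pre_key_generator initial_key no_of_keys) := by unfold Pre_key_generator; infer_instance
def pvWitness_key_generator : String × Int := ("abcdef", 2)

def Spec_key_generator (initial_key : String) (no_of_keys : Int) (out : List String) : Prop := out = key_generator_alt initial_key no_of_keys
instance (initial_key : String) (no_of_keys : Int) (out : List String) : Decidable (Spec_key_generator initial_key no_of_keys out) := by unfold Spec_key_generator; infer_instance

-- ===== CLAIM (what is proved, stated in full; the proofs are below) =====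
def Claim_equal_key_generator : Prop := ∀ (initial_key : String) (no_of_keys : Int), Dom_key_generator initial_key no_of_keys → Pre_key_generator initial_key no_of_keys → Spec_key_generator initial_key no_of_keys (key_generator initial_key no_of_keys)

-- ===== LEMMAS AND PROOFS =====
def pvF (s : List Char) (j : Nat) : Char := s.getD j ' '

def pvFA (s : List Char) (st : List (List Char) × List Char) (n : Nat) :
    List (List Char) × List Char :=
  let l := s.length
  let L := st.2.take (l / 2)
  let R := st.2.drop (l / 2)
  let L := (L ++ [L.headD ' ']).drop 1
  let R := (R ++ [R.headD ' ']).drop 1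
  let key := R ++ L
  (st.1 ++ [pvXorA (pvXorA L R) (pvKeyConstants.getD n [])], key)

def pvFB (s : List Char) (st : List (List Char) × List Nat) (n : Nat) :
    List (List Char) × List Nat :=
  let l := s.length
  let m := l / 2
  let pi := (List.range (l - m)).map (fun j => m + (j + 1) % (l - m))
            ++ (List.range m).map (fun j => (j + 1) % m)
  let p := pi.map (fun j => st.2.getD j 0)
  let c := pvKeyConstants.getD n []
  let out := (List.range m).foldl
      (fun out i =>
        let bit := if s.getD (p.getD ((l - m) + i) 0) ' ' = s.getD (p.getD i 0) ' '
                   then '0' else '1'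
        out ++ [if bit = c.getD i ' ' then '0' else '1']) []
  (st.1 ++ [out], p)

lemma key_generator_eq (ik : String) (nk : Int) :
    key_generator ik nk
      = ((List.range nk.toNat).foldl (pvFA ik.toList) ([], ik.toList)).1.map String.mk := rfl

lemma key_generator_alt_eq (ik : String) (nk : Int) :
    key_generator_alt ik nk
      = ((List.range nk.toNat).foldl (pvFB ik.toList)
          ([], List.range ik.toList.length)).1.map String.mk := rfl

lemma pv_getD_map {α β : Type} (f : α → β) (x : List α) (j : Nat) (h : j < x.length)
    (d : β) (d' : α) : (x.map f).getD j d = f (x.getD j d') := by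
  simp [List.getD_eq_getElem?_getD, List.getElem?_map, List.getElem?_eq_getElem h]

lemma pv_getD_drop (x : List Char) (m r : Nat) (d : Char) :
    (x.drop m).getD r d = x.getD (m + r) d := by
  simp [List.getD_eq_getElem?_getD, List.getElem?_drop]

lemma pv_getD_take (x : List Char) (m r : Nat) (d : Char) (h : r < m) :
    (x.take m).getD r d = x.getD r d := by
  simp [List.getD_eq_getElem?_getD, h]

lemma pv_map_range_getD (s : List Char) :
    (List.range s.length).map (fun j => s.getD j ' ') = s := by
  apply List.ext_getElem
  · simp
  · intro i h1 h2
    simp [List.getD_eq_getElem?_getD, List.getElem?_eq_getElem h2]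

lemma pv_rot_eq_map (x : List Char) (hx : x ≠ []) :
    (x ++ [x.headD ' ']).drop 1
      = (List.range x.length).map (fun i => x.getD ((i + 1) % x.length) ' ') := by
  have hlen : 0 < x.length := List.length_pos_iff.mpr hx
  apply List.ext_getElem
  · simp
  · intro i h1 h2
    have h1' : i < x.length := by simpa using h1
    rw [List.getElem_drop]
    by_cases hi : 1 + i < x.length
    · rw [List.getElem_append_left hi]
      have : (i + 1) % x.length = i + 1 := Nat.mod_eq_of_lt (by omega)
      simp only [List.getElem_map, List.getElem_range, this, List.getD_eq_getElem?_getD,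
        List.getElem?_eq_getElem (show i + 1 < x.length by omega), Option.getD_some]
      congr 1
      omega
    · have hi' : 1 + i = x.length := by omega
      rw [List.getElem_append_right (by omega)]
      have : (i + 1) % x.length = 0 := by
        rw [show i + 1 = x.length by omega]; exact Nat.mod_self _
      simp [this, List.getD_eq_getElem?_getD, List.getElem?_eq_getElem hlen,
        List.head?_eq_getElem?]

lemma pvXorA_eq_map (a b : List Char) :
    pvXorA a b = (List.range a.length).map
      (fun i => if a.getD i ' ' = b.getD i ' ' then '0' else '1') := by
  rw [pvXorA, PySem.List.foldl_append_singleton_eq_map]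
  exact List.nil_append _

lemma pv_getD_map_range (g : Nat → Char) (m i : Nat) (h : i < m) (d : Char) :
    ((List.range m).map g).getD i d = g i := by
  simp [List.getD_eq_getElem?_getD, List.getElem?_map, List.getElem?_range h]

lemma pv_pi_mem_lt (l : Nat) (h2 : 2 ≤ l) (j : Nat)
    (hj : j ∈ (List.range (l - l / 2)).map (fun j => l / 2 + (j + 1) % (l - l / 2))
            ++ (List.range (l / 2)).map (fun j => (j + 1) % (l / 2))) : j < l := by
  have hm : 1 ≤ l / 2 := by omega
  have hlm : 1 ≤ l - l / 2 := by omega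
  simp only [List.mem_append, List.mem_map, List.mem_range] at hj
  rcases hj with ⟨t, _, rfl⟩ | ⟨t, _, rfl⟩
  · have := Nat.mod_lt (t + 1) (y := l - l / 2) (by omega); omega
  · have := Nat.mod_lt (t + 1) (y := l / 2) (by omega); omega

lemma pv_stepA_eq (key : List Char) (h2 : 2 ≤ key.length) :
    ((key.drop (key.length / 2) ++ [(key.drop (key.length / 2)).headD ' ']).drop 1)
      ++ ((key.take (key.length / 2) ++ [(key.take (key.length / 2)).headD ' ']).drop 1)
    = ((List.range (key.length - key.length / 2)).map
          (fun j => key.length / 2 + (j + 1) % (key.length - key.length / 2))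
        ++ (List.range (key.length / 2)).map (fun j => (j + 1) % (key.length / 2))).map
        (fun j => key.getD j ' ') := by
  have hm : 1 ≤ key.length / 2 := by omega
  have hlm : key.length / 2 ≤ key.length := by omega
  have hd : (key.drop (key.length / 2)).length = key.length - key.length / 2 := by simp
  have ht : (key.take (key.length / 2)).length = key.length / 2 := by simp [hlm]
  rw [List.map_append, List.map_map, List.map_map,
    pv_rot_eq_map _ (by rw [← List.length_pos_iff]; omega),
    pv_rot_eq_map _ (by rw [← List.length_pos_iff]; omega), hd, ht]
  congr 1
  · apply List.map_congr_left
    intro t _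
    simp only [Function.comp]
    rw [pv_getD_drop]
  · apply List.map_congr_left
    intro t ht'
    simp only [Function.comp, List.mem_range] at *
    rw [pv_getD_take _ _ _ _ (Nat.mod_lt _ (by omega))]

lemma pv_out_eq (s : List Char) (L' R' : List Char) (p' : List Nat) (c : List Char)
    (h2 : 2 ≤ s.length)
    (hL : L'.length = s.length / 2) (hR : R'.length = s.length - s.length / 2)
    (hkey : R' ++ L' = p'.map (pvF s)) :
    pvXorA (pvXorA L' R') c
      = (List.range (s.length / 2)).foldl
          (fun out i =>
            out ++ [if (if s.getD (p'.getD ((s.length - s.length / 2) + i) 0) ' '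
                        = s.getD (p'.getD i 0) ' ' then '0' else '1')
                      = c.getD i ' ' then '0' else '1']) [] := by
  have hml : s.length / 2 ≤ s.length - s.length / 2 := by omega
  have hp'len : p'.length = s.length := by
    have h := congrArg List.length hkey
    simp [hL, hR] at h
    omega
  rw [PySem.List.foldl_append_singleton_eq_map, List.nil_append]
  rw [pvXorA_eq_map, pvXorA_eq_map]
  simp only [List.length_map, List.length_range, hL]
  apply List.map_congr_left
  intro i hi
  rw [List.mem_range] at hi
  rw [pv_getD_map_range _ _ _ hi]
  have e1 : L'.getD i ' ' = s.getD (p'.getD ((s.length - s.length / 2) + i) 0) ' ' := by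
    have h0 : (R' ++ L').getD ((s.length - s.length / 2) + i) ' ' = L'.getD i ' ' := by
      rw [List.getD_eq_getElem?_getD, List.getElem?_append_right (by omega), hR,
        Nat.add_sub_cancel_left, ← List.getD_eq_getElem?_getD]
    rw [hkey] at h0
    rw [← h0, pv_getD_map (pvF s) p' _ (by omega) ' ' 0, pvF]
  have e2 : R'.getD i ' ' = s.getD (p'.getD i 0) ' ' := by
    have h0 : (R' ++ L').getD i ' ' = R'.getD i ' ' := by
      rw [List.getD_eq_getElem?_getD, List.getElem?_append_left (by omega),
        ← List.getD_eq_getElem?_getD]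
    rw [hkey] at h0
    rw [← h0, pv_getD_map (pvF s) p' _ (by omega) ' ' 0, pvF]
  rw [e1, e2]

lemma pv_step_eq (s : List Char) (h2 : 2 ≤ s.length) (keys : List (List Char))
    (p : List Nat) (hp : p.length = s.length) (n : Nat) :
    pvFA s (keys, p.map (pvF s)) n
      = ((pvFB s (keys, p) n).1, (pvFB s (keys, p) n).2.map (pvF s)) := by
  simp only [pvFA, pvFB]
  set K := p.map (pvF s) with hK
  have hkl : K.length = s.length := by simp [hK, hp]
  set m := s.length / 2 with hm
  set L' := (K.take m ++ [(K.take m).headD ' ']).drop 1 with hL'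
  set R' := (K.drop m ++ [(K.drop m).headD ' ']).drop 1 with hR'
  set pi := (List.range (s.length - m)).map (fun j => m + (j + 1) % (s.length - m))
            ++ (List.range m).map (fun j => (j + 1) % m) with hpi
  set p' := pi.map (fun j => p.getD j 0) with hp'
  have hperm : R' ++ L' = p'.map (pvF s) := by
    have h := pv_stepA_eq K (by omega)
    rw [hkl] at h
    rw [hR', hL', h, hp', hpi, List.map_map]
    apply List.map_congr_left
    intro j hj
    have hjl : j < s.length := pv_pi_mem_lt s.length h2 j (by exact hj)
    simp only [Function.comp]
    rw [hK]
    exact pv_getD_map (pvF s) p j (by omega) ' ' 0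
  have hLlen : L'.length = m := by
    rw [hL']; simp; omega
  have hRlen : R'.length = s.length - m := by
    rw [hR']; simp; omega
  have hout := pv_out_eq s L' R' p' (pvKeyConstants.getD n []) h2 hLlen hRlen hperm
  refine Prod.ext ?_ ?_
  · simp only []
    rw [hout]
  · simp only []
    exact hperm

lemma pv_loop_eq (s : List Char) (h2 : 2 ≤ s.length) (k : Nat) :
    (List.range k).foldl (pvFA s) ([], s)
      = (((List.range k).foldl (pvFB s) ([], List.range s.length)).1,
         ((List.range k).foldl (pvFB s) ([], List.range s.length)).2.map (pvF s))
    ∧ ((List.range k).foldl (pvFB s) ([], List.range s.length)).2.length = s.length := by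
  induction k with
  | zero =>
    refine ⟨?_, by simp⟩
    refine Prod.ext (by simp) ?_
    exact (pv_map_range_getD s).symm
  | succ k ih =>
    obtain ⟨ih1, ih2⟩ := ih
    rw [List.range_succ, List.foldl_append, List.foldl_append,
      List.foldl_cons, List.foldl_nil, List.foldl_cons, List.foldl_nil]
    have hs := pv_step_eq s h2
      ((List.range k).foldl (pvFB s) ([], List.range s.length)).1
      ((List.range k).foldl (pvFB s) ([], List.range s.length)).2 ih2 k
    constructor
    · rw [ih1, hs, Prod.mk.eta]
    · simp [pvFB]
      omega


-- ===== VERDICT (by name: the statement is the Claim_ definition above) =====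
theorem key_generator_spec : Claim_equal_key_generator := by
  intro ik nk hdom hpre
  unfold Spec_key_generator
  rw [key_generator_eq, key_generator_alt_eq]
  rcases hpre with h | h
  · rw [Int.toNat_of_nonpos h]
    rfl
  · rw [(pv_loop_eq ik.toList h.1 nk.toNat).1]
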